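-- pv_equiv track=rewrite | github.com/pranav9989/be | backend/interview_analyzer.py | detect_fillers_repetitions
-- ===== SOURCE A (Python) =====
-- def detect_fillers_repetitions(text):
--     fillers = ["um", "uh", "like", "you know", "i mean"]
--     filler_count = 0
--     repetitions = 0
--     words = text.lower().split()
--
--     for i, word in enumerate(words):
--         if word in fillers:
--             filler_count += 1
--         # Simple repetition detection for immediate consecutive words
--         if i > 0 and words[i] == words[i-1]:
--             repetitions += 1
--
--     return filler_count, repetitions
-- ===== SOURCE B (Python) =====
-- def detect_fillers_repetitions(text):
--     words = text.lower().split()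
--     cnt = {}
--     for w in words:
--         cnt[w] = cnt.get(w, 0) + 1
--     fillers = ["um", "uh", "like", "you know", "i mean"]
--     filler_count = sum(cnt.get(f, 0) for f in fillers)
--     repetitions = sum(1 for a, b in zip(words, words[1:]) if a == b)
--     return filler_count, repetitions
-- ===== Notes on version B (the rewrite author's own statement) =====
-- stated objective: alternative
-- what changed: Replaces A's single fused indexed scan with a frequency table built once and consumed by lookups of the five fixed filler words, plus a separate adjacent-pair zip pass for repetitions.
import Mathlib
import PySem

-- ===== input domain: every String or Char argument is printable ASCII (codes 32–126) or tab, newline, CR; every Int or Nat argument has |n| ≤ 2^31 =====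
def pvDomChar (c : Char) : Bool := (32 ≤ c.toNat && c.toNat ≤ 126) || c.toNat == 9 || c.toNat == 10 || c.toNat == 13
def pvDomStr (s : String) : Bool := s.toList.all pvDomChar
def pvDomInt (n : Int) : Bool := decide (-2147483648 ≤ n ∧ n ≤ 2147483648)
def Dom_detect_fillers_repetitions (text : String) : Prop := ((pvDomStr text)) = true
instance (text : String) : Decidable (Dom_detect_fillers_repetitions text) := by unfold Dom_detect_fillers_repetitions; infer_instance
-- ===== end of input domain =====

-- B replaces A's fused indexed scan by a frequency table consumed by five lookups plus a separate zip pass; alternative, same return value.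

-- ===== PORT A =====
def detect_fillers_repetitions (text : String) : Int × Int :=
  let fillers : List String := ["um", "uh", "like", "you know", "i mean"]
  let words := PySem.Str.split₀ (PySem.Str.lower text)
  let st :=
    (PySem.List.enumerate words).foldl
      (fun (acc : Int × Int) (iw : Int × String) =>
        (if fillers.contains iw.2 then acc.1 + 1 else acc.1,
         if iw.1 > 0 ∧ PySem.List.pyGetD words iw.1 "" = PySem.List.pyGetD words (iw.1 - 1) ""
           then acc.2 + 1 else acc.2))
      (0, 0)
  st

-- ===== PORT B =====
def detect_fillers_repetitions_alt (text : String) : Int × Int :=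
  let words := PySem.Str.split₀ (PySem.Str.lower text)
  let cnt := words.foldl (fun (d : PySem.Dict String Int) w => d.insert w (d.getD w 0 + 1)) PySem.Dict.empty
  let fillers : List String := ["um", "uh", "like", "you know", "i mean"]
  let filler_count := (fillers.map (fun f => cnt.getD f 0)).sum
  let repetitions : Int := ((words.zip (words.drop 1)).countP (fun p => p.1 == p.2) : Nat)
  (filler_count, repetitions)

-- ===== PRECONDITION & SPEC =====
def Spec_detect_fillers_repetitions (text : String) (out : Int × Int) : Prop := out = detect_fillers_repetitions_alt text
instance (text : String) (out : Int × Int) : Decidable (Spec_detect_fillers_repetitions text out) := by unfold Spec_detect_fillers_repetitions; infer_instance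

-- ===== CLAIM (what is proved, stated in full; the proofs are below) =====
def Claim_equal_detect_fillers_repetitions : Prop := ∀ (text : String), Dom_detect_fillers_repetitions text → Spec_detect_fillers_repetitions text (detect_fillers_repetitions text)

-- ===== LEMMAS AND PROOFS =====

-- natural count of immediately repeated words, carrying the previous word
def pvAdjFrom : Option String → List String → Nat
  | _, [] => 0
  | none, x :: t => pvAdjFrom (some x) t
  | some p, x :: t => (if p = x then 1 else 0) + pvAdjFrom (some x) t

theorem pvZip_eq_adjFrom_aux (t : List String) : ∀ x,
    ((x :: t).zip t).countP (fun p => p.1 == p.2) = pvAdjFrom (some x) t := by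
  induction t with
  | nil => intro x; simp [pvAdjFrom]
  | cons y r ih =>
    intro x
    simp only [List.zip_cons_cons, List.countP_cons, pvAdjFrom, ih y]
    by_cases h : x = y
    · simp [h]
      omega
    · simp [h]

theorem pvZip_eq_adjFrom (xs : List String) :
    (xs.zip (xs.drop 1)).countP (fun p => p.1 == p.2) = pvAdjFrom none xs := by
  cases xs with
  | nil => simp [pvAdjFrom]
  | cons x t => simpa [pvAdjFrom] using pvZip_eq_adjFrom_aux t x

theorem pvEnum_eq_adjFrom (full : List String) : ∀ (xs pre : List String), pre ++ xs = full →
    (PySem.List.enumerate xs (pre.length : Int)).countP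
      (fun iw => decide (iw.1 > 0 ∧ PySem.List.pyGetD full iw.1 "" = PySem.List.pyGetD full (iw.1 - 1) ""))
    = pvAdjFrom pre.getLast? xs := by
  intro xs
  induction xs with
  | nil => intro pre h; simp [PySem.List.enumerate_nil, pvAdjFrom]
  | cons x t ih =>
    intro pre h
    rw [PySem.List.enumerate_cons, List.countP_cons]
    have hcnt : (PySem.List.enumerate t ((pre.length : Int) + 1)).countP
        (fun iw => decide (iw.1 > 0 ∧ PySem.List.pyGetD full iw.1 "" = PySem.List.pyGetD full (iw.1 - 1) ""))
        = pvAdjFrom (some x) t := by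
      have := ih (pre ++ [x]) (by simpa using h)
      simpa [List.getLast?_append] using this
    have hx : PySem.List.pyGetD full (pre.length : Int) "" = x := by
      subst h
      rw [PySem.List.pyGetD_natCast]
      simp [List.getD]
    rw [hcnt]
    cases hpre : pre.getLast? with
    | none =>
      have hp : pre = [] := List.getLast?_eq_none_iff.mp hpre
      subst hp
      simp [pvAdjFrom]
    | some v =>
      have hne : pre ≠ [] := by
        intro hp; rw [hp] at hpre; simp at hpre
      have hlen : 0 < pre.length := List.length_pos_iff.mpr hne
      have hv : PySem.List.pyGetD full ((pre.length : Int) - 1) "" = v := by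
        subst h
        have h1 : ((pre.length : Int) - 1) = ((pre.length - 1 : Nat) : Int) := by omega
        rw [h1, PySem.List.pyGetD_natCast]
        have h2 : pre.length - 1 < (pre ++ x :: t).length := by simp; omega
        rw [List.getD_eq_getElem _ _ h2]
        rw [List.getElem_append_left (by omega)]
        have h3 : pre[pre.length - 1]? = some v := by
          rw [← List.getLast?_eq_getElem?]; exact hpre
        obtain ⟨hlt, hval⟩ := List.getElem?_eq_some_iff.mp h3
        exact hval
      have hgt : (0:Int) < (pre.length : Int) := by exact_mod_cast hlen
      simp only [hx, hv, pvAdjFrom, gt_iff_lt]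
      by_cases hvx : v = x
      · simp [hvx, hlen]
        omega
      · have : x ≠ v := fun hc => hvx hc.symm
        simp [hvx, this]

theorem pvCountP_or (p q : String → Bool) (h : ∀ x, ¬(p x = true ∧ q x = true))
    (ws : List String) :
    ws.countP (fun x => p x || q x) = ws.countP p + ws.countP q := by
  induction ws with
  | nil => simp
  | cons w ws ih =>
    simp only [List.countP_cons, ih]
    by_cases hp : p w = true <;> by_cases hq : q w = true
    · exact absurd ⟨hp, hq⟩ (h w)
    all_goals simp [hp, hq] <;> omega

theorem pvCountP_split (f : String) (r : List String) (hfr : f ∉ r) (ws : List String) :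
    ws.countP (fun w => (f :: r).contains w) = ws.count f + ws.countP (fun w => r.contains w) := by
  have hpred : ws.countP (fun w => (f :: r).contains w)
      = ws.countP (fun w => (fun x => x == f) w || (fun x => r.contains x) w) := by
    apply List.countP_congr
    intro x _
    simp
  rw [hpred, pvCountP_or _ _ ?_ ws]
  · have hc : ws.countP (fun w => w == f) = ws.count f := rfl
    rw [hc]
  · intro x ⟨h1, h2⟩
    have hx : x = f := by simpa using h1
    exact hfr (hx ▸ (by simpa using h2))

-- sum of counts of pairwise-distinct values = countP of membership
theorem pvSumCount (words : List String) : ∀ (fl : List String), fl.Nodup →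
    (fl.map (fun f => (words.count f : Int))).sum = (words.countP (fun w => fl.contains w) : Nat) := by
  intro fl
  induction fl with
  | nil => intro _; simp
  | cons f r ih =>
    intro hnd
    obtain ⟨hfr, hndr⟩ := List.nodup_cons.mp hnd
    rw [List.map_cons, List.sum_cons, ih hndr, pvCountP_split f r hfr words]
    push_cast
    ring

-- ===== VERDICT (by name: the statement is the Claim_ definition above) =====
theorem detect_fillers_repetitions_spec : Claim_equal_detect_fillers_repetitions := by
  intro text _
  unfold Spec_detect_fillers_repetitions
  simp only [detect_fillers_repetitions, detect_fillers_repetitions_alt]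
  set words := PySem.Str.split₀ (PySem.Str.lower text) with hw
  rw [PySem.List.foldl_prod_mk
      (f := fun (acc : Int) (iw : Int × String) =>
        if (["um", "uh", "like", "you know", "i mean"] : List String).contains iw.2 then acc + 1 else acc)
      (g := fun (acc : Int) (iw : Int × String) =>
        if iw.1 > 0 ∧ PySem.List.pyGetD words iw.1 "" = PySem.List.pyGetD words (iw.1 - 1) ""
          then acc + 1 else acc)]
  rw [Prod.mk.injEq]
  refine ⟨?_, ?_⟩
  · -- filler component
    rw [PySem.List.foldl_if_add_one]
    have h1 : (PySem.List.enumerate words).countP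
        (fun iw => (["um", "uh", "like", "you know", "i mean"] : List String).contains iw.2)
        = words.countP (fun w => (["um", "uh", "like", "you know", "i mean"] : List String).contains w) := by
      conv_rhs => rw [← PySem.List.map_snd_enumerate words 0]
      rw [List.countP_map]
      rfl
    have h2 : ∀ f : String,
        (words.foldl (fun (d : PySem.Dict String Int) w => d.insert w (d.getD w 0 + 1)) PySem.Dict.empty).getD f 0
        = (words.count f : Int) := by
      intro f
      rw [PySem.Dict.getD_foldl_insert_add_one]
      simp [PySem.Dict.empty, PySem.Dict.getD, PySem.Dict.get?]
    rw [h1]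
    simp only [h2]
    rw [pvSumCount words _ (by decide)]
    simp
  · -- repetition component
    rw [PySem.List.foldl_ite_add_one]
    have h3 := pvEnum_eq_adjFrom words words ([] : List String) rfl
    simp only [List.length_nil, Nat.cast_zero, List.getLast?_nil] at h3
    rw [h3, pvZip_eq_adjFrom]
    simp
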